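-- pv_equiv track=rewrite | github.com/Axfrome/Travaux | perso/Monscript.py | extraire_liens
-- ===== SOURCE A (Python) =====
-- def extraire_liens(a):
--     #initialisation de variable
--     listeliens= []
--     liens = ""
--     test2 = ""
--     x = 0
--     C = 0
--     C2 = 0
--     test = """href="https"""
--     #reconnaissance HREF
--     while x < len(a)-10:
--         test2 = ""
--         C = x
--         while C < x+11:
--             test2 = test2+a[C]
--             C = C+1
--         if test == test2:
--     #HREF si reconnue, on enregistre le lien.
--                 C2 = x
--                 #en cas de chevrons non fermante on ne fais rien
--                 while C2 < len(a):
--                     if C2 == len(a):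
--                         liens = ""
--                         break
--                     liens = liens+a[C2]
--                     C2 = C2+1
--                     #une fois le liens récupéré on l'ajoute à la liste.
--                     if a[C2-1] == ">":
--                         listeliens.append(liens)
--                         liens = ""
--                         break
--         #lettre suivante
--         x = x+1
--     return listeliens
-- ===== SOURCE B (Python) =====
-- def _find_gt(a, i):
--     # first index >= i holding '>', else None
--     while i < len(a):
--         if a[i] == '>':
--             return i
--         i += 1
--     return None
--
-- def extraire_liens(a):
--     # pass 1: all (overlapping) match positions of the 11-char pattern
--     starts = [i for i in range(len(a) - 10) if a[i:i+11] == 'href="https']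
--     # pass 2: slice each link up to (and including) the first '>' after it
--     res = []
--     for i in starts:
--         j = _find_gt(a, i)
--         if j is not None:
--             res.append(a[i:j+1])
--     return res
-- ===== Notes on version B (the rewrite author's own statement) =====
-- stated objective: faster
-- what changed: Replaces A's single stateful while-loop (char-by-char test2 rebuilding via string concatenation, a carried-over 'liens' accumulator and manual index bookkeeping) by two independent passes: collect all overlapping match positions with a slice comparison, then slice each link up to the first '>' found from its start.
import Mathlib
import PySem

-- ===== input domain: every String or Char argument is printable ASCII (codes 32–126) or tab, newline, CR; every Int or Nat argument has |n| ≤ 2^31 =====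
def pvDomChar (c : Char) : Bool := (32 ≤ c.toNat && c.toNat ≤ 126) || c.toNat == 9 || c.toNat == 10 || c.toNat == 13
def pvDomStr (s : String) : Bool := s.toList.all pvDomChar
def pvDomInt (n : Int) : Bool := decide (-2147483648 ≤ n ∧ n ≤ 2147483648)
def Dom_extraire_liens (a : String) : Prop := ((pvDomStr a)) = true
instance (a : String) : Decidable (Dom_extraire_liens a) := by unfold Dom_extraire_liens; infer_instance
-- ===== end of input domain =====

-- B replaces A's single stateful scan by two passes (match positions, then slices); objective: simpler.
-- Return-value equivalence (neither version mutates its argument).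

-- ===== PORT A =====
-- inner loop building test2 = the 11 chars a[x..x+10] one by one (these indices are always
-- in range when the loop runs, so Python's a[C] never raises; ported as getD)
def pvTestLoop (s : List Char) (C stop : Nat) (acc : List Char) : List Char :=
  if C < stop then pvTestLoop s (C + 1) stop (acc ++ [s.getD C ' ']) else acc
termination_by stop - C

-- inner link-collection loop: returns the final (liens, listeliens) state
def pvLinkLoop (s : List Char) (C2 : Nat) (liens : List Char) (ll : List (List Char)) :
    List Char × List (List Char) :=
  if C2 < s.length then
    let liens' := liens ++ [s.getD C2 ' ']
    if s.getD ((C2 + 1) - 1) ' ' = '>' then (([] : List Char), ll ++ [liens'])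
    else pvLinkLoop s (C2 + 1) liens' ll
  else (liens, ll)
termination_by s.length - C2

-- outer while x < len(a)-10 (Nat subtraction agrees with Python's Int test here since x ≥ 0)
def pvMainLoop (s : List Char) (x : Nat) (liens : List Char) (ll : List (List Char)) :
    List (List Char) :=
  if x < s.length - 10 then
    let test2 := pvTestLoop s x (x + 11) []
    if test2 = "href=\"https".toList then
      let p := pvLinkLoop s x liens ll
      pvMainLoop s (x + 1) p.1 p.2
    else pvMainLoop s (x + 1) liens ll
  else ll
termination_by s.length - 10 - x

def extraire_liens (a : String) : List String :=
  (pvMainLoop a.toList 0 [] []).map String.ofList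

-- ===== PORT B =====
-- port of _find_gt: first index ≥ i holding '>', else none
def pvFindGt (s : List Char) (i : Nat) : Option Nat :=
  if i < s.length then
    if s.getD i ' ' = '>' then some i else pvFindGt s (i + 1)
  else none
termination_by s.length - i

def extraire_liens_alt (a : String) : List String :=
  ((List.range (a.toList.length - 10)).filter
    (fun (i : Nat) => PySem.List.slice a.toList (some (i : Int)) (some ((i : Int) + 11)) = "href=\"https".toList)).foldl
    (fun res (i : Nat) =>
      match pvFindGt a.toList i with
      | some j => res ++ [String.ofList (PySem.List.slice a.toList (some (i : Int)) (some ((j : Int) + 1)))]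
      | none => res) []

-- ===== PRECONDITION & SPEC =====
def Spec_extraire_liens (a : String) (out : List String) : Prop := out = extraire_liens_alt a
instance (a : String) (out : List String) : Decidable (Spec_extraire_liens a out) := by unfold Spec_extraire_liens; infer_instance

-- ===== CLAIM (what is proved, stated in full; the proofs are below) =====
def Claim_equal_extraire_liens : Prop := ∀ (a : String), Dom_extraire_liens a → Spec_extraire_liens a (extraire_liens a)

-- ===== LEMMAS AND PROOFS =====

-- common core: for each match position, the link up to and including the first '>' (if any)
def pvCore (s : List Char) (x : Nat) : List (List Char) :=
  if x < s.length - 10 then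
    (if (s.drop x).take 11 = "href=\"https".toList then
      (match pvFindGt s x with
       | some j => [(s.drop x).take (j + 1 - x)]
       | none => ([] : List (List Char)))
     else []) ++ pvCore s (x + 1)
  else []
termination_by s.length - 10 - x

theorem pvTestLoop_eq (s : List Char) (n : Nat) : ∀ (C : Nat) (acc : List Char),
    C + n ≤ s.length → pvTestLoop s C (C + n) acc = acc ++ (s.drop C).take n := by
  induction n with
  | zero => intro C acc h; rw [pvTestLoop]; simp
  | succ n ih =>
    intro C acc h
    have hC : C < s.length := by omega
    have h2 : C + (n + 1) = (C + 1) + n := by omega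
    rw [pvTestLoop, if_pos (by omega), h2, ih (C + 1) _ (by omega),
      List.drop_eq_getElem_cons hC, List.take_succ_cons,
      List.getD_eq_getElem s ' ' hC]
    simp

theorem pvFindGt_some_ge (s : List Char) (i j : Nat) (h : pvFindGt s i = some j) : i ≤ j := by
  induction i using pvFindGt.induct s with
  | case1 i hi hc => rw [pvFindGt, if_pos hi, if_pos hc] at h; simp at h; omega
  | case2 i hi hc ih => rw [pvFindGt, if_pos hi, if_neg hc] at h; have := ih h; omega
  | case3 i hi => rw [pvFindGt, if_neg hi] at h; simp at h

theorem pvFindGt_none_succ (s : List Char) (i : Nat) (h : pvFindGt s i = none) :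
    pvFindGt s (i + 1) = none := by
  rw [pvFindGt] at h
  by_cases hi : i < s.length
  · rw [if_pos hi] at h
    by_cases hc : s.getD i ' ' = '>'
    · rw [if_pos hc] at h; simp at h
    · rwa [if_neg hc] at h
  · rw [pvFindGt, if_neg (by omega)]

theorem pvLinkLoop_eq (s : List Char) (C2 : Nat) :
    ∀ (liens : List Char) (ll : List (List Char)),
    pvLinkLoop s C2 liens ll =
      match pvFindGt s C2 with
      | some j => (([] : List Char), ll ++ [liens ++ (s.drop C2).take (j + 1 - C2)])
      | none => (liens ++ s.drop C2, ll) := by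
  induction C2 using pvFindGt.induct s with
  | case1 i hi hc =>
    intro liens ll
    rw [pvLinkLoop, if_pos hi, pvFindGt, if_pos hi, if_pos hc]
    simp only [Nat.add_sub_cancel, hc, if_pos]
    rw [List.drop_eq_getElem_cons hi]
    rw [List.getD_eq_getElem s ' ' hi] at hc
    simp [hc]
  | case2 i hi hc ih =>
    intro liens ll
    rw [pvLinkLoop, if_pos hi, pvFindGt, if_pos hi, if_neg hc]
    simp only [Nat.add_sub_cancel, hc, ite_false]
    rw [ih]
    cases hf : pvFindGt s (i + 1) with
    | some j =>
      have hij : i + 1 ≤ j := pvFindGt_some_ge s (i + 1) j hf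
      simp only []
      rw [List.drop_eq_getElem_cons hi, List.getD_eq_getElem s ' ' hi]
      have h1 : j + 1 - i = (j + 1 - (i + 1)) + 1 := by omega
      rw [h1, List.take_succ_cons]
      simp
    | none =>
      simp only []
      rw [List.drop_eq_getElem_cons hi, List.getD_eq_getElem s ' ' hi]
      simp
  | case3 i hi =>
    intro liens ll
    rw [pvLinkLoop, if_neg hi, pvFindGt, if_neg hi]
    simp [List.drop_of_length_le (by omega : s.length ≤ i)]

theorem pvMainLoop_eq (s : List Char) :
    ∀ (k x : Nat) (liens : List Char) (ll : List (List Char)),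
    s.length - 10 - x ≤ k →
    (liens = [] ∨ pvFindGt s x = none) →
    pvMainLoop s x liens ll = ll ++ pvCore s x := by
  intro k
  induction k with
  | zero =>
    intro x liens ll hk _
    rw [pvMainLoop, if_neg (by omega), pvCore, if_neg (by omega)]
    simp
  | succ k ih =>
    intro x liens ll hk hinv
    by_cases hx : x < s.length - 10
    · rw [pvMainLoop, if_pos hx, pvCore, if_pos hx]
      have hT : pvTestLoop s x (x + 11) [] = (s.drop x).take 11 := by
        simpa using pvTestLoop_eq s 11 x [] (by omega)
      rw [hT]
      by_cases hp : (s.drop x).take 11 = "href=\"https".toList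
      · rw [if_pos hp, if_pos hp, pvLinkLoop_eq]
        cases hf : pvFindGt s x with
        | some j =>
          rcases hinv with h | h
          · subst h
            simp only
            rw [ih (x + 1) [] _ (by omega) (Or.inl rfl)]
            simp
          · rw [h] at hf; simp at hf
        | none =>
          simp only
          rw [ih (x + 1) _ _ (by omega) (Or.inr (pvFindGt_none_succ s x hf))]
          simp
      · rw [if_neg hp, if_neg hp]
        have hinv' : liens = [] ∨ pvFindGt s (x + 1) = none := by
          rcases hinv with h | h
          · exact Or.inl h
          · exact Or.inr (pvFindGt_none_succ s x h)
        rw [ih (x + 1) liens ll (by omega) hinv']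
        simp
    · rw [pvMainLoop, if_neg hx, pvCore, if_neg hx]
      simp

theorem pvFoldl_eq (s : List Char) (n : Nat) : ∀ (x : Nat) (res : List String), x + n = s.length - 10 →
    ((List.range' x n).filter
      (fun (i : Nat) => PySem.List.slice s (some (i : Int)) (some ((i : Int) + 11)) = "href=\"https".toList)).foldl
      (fun res (i : Nat) =>
        match pvFindGt s i with
        | some j => res ++ [String.ofList (PySem.List.slice s (some (i : Int)) (some ((j : Int) + 1)))]
        | none => res) res
      = res ++ (pvCore s x).map String.ofList := by
  induction n with
  | zero =>
    intro x res h
    rw [pvCore, if_neg (by omega)]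
    simp
  | succ n ih =>
    intro x res h
    rw [List.range'_succ, pvCore, if_pos (by omega)]
    have hslice : PySem.List.slice s (some (x : Int)) (some ((x : Int) + 11)) = (s.drop x).take 11 := by
      have : ((x : Int) + 11) = ((x + 11 : Nat) : Int) := by push_cast; ring
      rw [this, PySem.List.slice_natCast]
      congr 1
      omega
    by_cases hp : (s.drop x).take 11 = "href=\"https".toList
    · rw [List.filter_cons_of_pos (by simpa [hslice] using hp), if_pos hp]
      rw [List.foldl_cons, ih (x + 1) _ (by omega)]
      cases hf : pvFindGt s x with
      | some j =>
        have hxj : x ≤ j := pvFindGt_some_ge s x j hf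
        have hslice2 : PySem.List.slice s (some (x : Int)) (some ((j : Int) + 1)) = (s.drop x).take (j + 1 - x) := by
          have : ((j : Int) + 1) = ((j + 1 : Nat) : Int) := by push_cast; ring
          rw [this, PySem.List.slice_natCast]
        simp [hslice2]
      | none => simp
    · rw [List.filter_cons_of_neg (by simpa [hslice] using hp), if_neg hp]
      rw [ih (x + 1) _ (by omega)]
      simp

-- ===== VERDICT (by name: the statement is the Claim_ definition above) =====
theorem extraire_liens_spec : Claim_equal_extraire_liens := by
  intro a _
  show (pvMainLoop a.toList 0 [] []).map String.ofList = extraire_liens_alt a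
  rw [pvMainLoop_eq a.toList a.toList.length 0 [] [] (by omega) (Or.inl rfl)]
  unfold extraire_liens_alt
  rw [List.range_eq_range',
    pvFoldl_eq a.toList (a.toList.length - 10) 0 [] (by omega)]
  simp
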